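/- GENERATED by mk_final_copies.py from the proof of the farm's unit `do_floor` (farm:do_floor.2: Proof.lean) as the
   re-elaboration sweep compiled it — do not edit. -/
import Asan.CheckWalk
import Vorbis.Spec.Units.do_floor
import Vorbis.Spec.Worked.do_floor_Lemmas

open X86 X86.User Asan Vorbis Vorbis.Spec Vorbis.Spec.do_floor

set_option maxRecDepth 4000
set_option maxHeartbeats 0
set_option Elab.async false

namespace Vorbis.Spec.do_floor

/-- **THE PROLOGUE, THIRD PART** 0x108a3d … 0x108a84 (lines 3107–3110: `g = &f->floor_config[floor].floor1`,
`ly = finalY[0] * g->floor1_multiplier`, `lx = 0`, `q = 1`), from the check of `f->floor_config` to the head of the floor loop,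
then `loop_ok`. Same binders as `loop_ok`; then the frame of the prologue at the state `s`. -/
theorem pro3_ok
    (Lay : Layout) (hLay : Lay.hi = 0x1000000) (μ : Microarch) (hμ : UserX.MicroOK μ) (u₀ : State)
    (hcode : HasCodeNat Lay u₀ Vorbis.L.do_floor.entry Vorbis.Code.code_do_floor.nat Vorbis.L.do_floor.size)
    (hload8 : Asan.SmallCheck Lay μ Vorbis.WayInv (Vorbis.CodeOK u₀) [.rax, .rcx, .rdx] 8 Vorbis.L.__asan_load8_noabort.entry)
    (hload1 : Asan.SmallCheck Lay μ Vorbis.WayInv (Vorbis.CodeOK u₀) [.rax, .rdx] 1 Vorbis.L.__asan_load1_noabort.entry)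
    (hload2 : Asan.SmallCheck Lay μ Vorbis.WayInv (Vorbis.CodeOK u₀) [.rax, .rcx, .rdx] 2 Vorbis.L.__asan_load2_noabort.entry)
    (hdraw : ∀ (others : List Obj) (frames : List (Nat × FrameLayout)),
      Calls Lay μ Vorbis.WayInv (Vorbis.conv u₀) Vorbis.L.draw_line.entry (Vorbis.Spec.draw_line.spec others frames))
    (hload4 : Asan.SmallCheck Lay μ Vorbis.WayInv (Vorbis.CodeOK u₀) [.rax, .rcx, .rdx] 4 Vorbis.L.__asan_load4_noabort.entry)
    (others : List Obj) (frames : List (Nat × FrameLayout)) (Blk : Block → Prop) (mi : Nat) (u : State) (ret : Word)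
    (he : AtEntry (Vorbis.conv u₀) Vorbis.L.do_floor.entry (Vorbis.Spec.do_floor.spec others frames Blk mi).frame ret u)
    (hpre : (Vorbis.Spec.do_floor.spec others frames Blk mi).pre u)
    (f m i C mux fl G V : Nat) (hf : (u.reg .rdi).toNat = f) (hm : (u.reg .rsi).toNat = m)
    (hi : s32 (u.reg .rdx) = (i : Int)) (hC : Mapping.chan u.mem m = C)
    (hmux : MappingChannel.mux u.mem (Mapping.chan_at u.mem m i) = mux)
    (hfl' : Mapping.submap_floor u.mem m mux = fl) (hG : stb_vorbis.floor_config u.mem f = G)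
    (hV : Floor1.values u.mem (G + 1596 * fl) = (V : Int))
    (n2v : BitVec 32) (N : Int) (nn tlo : Nat) (hn2v : (Word.part .w32 (u.reg .rcx)).sshiftRight 1 = n2v)
    (hN : s32 (u.reg .rcx) / 2 = N) (hnn : N.toNat = nn)
    (htlo : tlo = if nn = 0 then 0 else (u.reg .r8).toNat) :
    ∀ (s : State), s.rip = Vorbis.L.do_floor.chk5 →
      s.reg .rsp = u.reg .rsp - 72 →
      s.reg .rbx = UInt64.ofNat fl →
      s.reg .rbp = u.reg .rdi →
      s.reg .r15 = u.reg .r9 →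
      s.reg .rdi = u.reg .rdi + 312 →
      RegsKept [.r13, .rdi, .rcx, .r15, .r12, .rbx, .rbp, .rsp, .rax, .rdx, .r14, .rsi, .r8, .r9, .r10, .r11, .r16, .r17, .r18, .r19, .r20, .r21, .r22, .r23, .r24, .r25, .r26, .r27, .r28, .r29, .r30, .r31] u s →
      Mem.SameExcept [⟨(u.reg .rsp).toNat - 192, (u.reg .rsp).toNat⟩] u.mem s.mem →
      ShadowUntouched u.mem s.mem →
      UInt64.ofNat (s.mem.readLE (u.reg .rsp) 8) = ret →
      UInt64.ofNat (s.mem.readLE (u.reg .rsp - 8) 8) = u.reg .r15 →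
      UInt64.ofNat (s.mem.readLE (u.reg .rsp - 16) 8) = u.reg .r14 →
      UInt64.ofNat (s.mem.readLE (u.reg .rsp - 24) 8) = u.reg .r13 →
      UInt64.ofNat (s.mem.readLE (u.reg .rsp - 32) 8) = u.reg .r12 →
      UInt64.ofNat (s.mem.readLE (u.reg .rsp - 40) 8) = u.reg .rbp →
      UInt64.ofNat (s.mem.readLE (u.reg .rsp - 48) 8) = u.reg .rbx →
      UInt64.ofNat (s.mem.readLE (u.reg .rsp - 64) 8) = u.reg .r8 →
      s.mem.readLE (u.reg .rsp - 68) 4 = n2v.toNat →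
      Mem.EqOn Vorbis.L.textLo Vorbis.L.textHi u₀.mem s.mem →
      s.flags .df = false → s.mxcsr &&& 8064 = 8064 → SseOK s →
      ReachVia Lay μ WayInv s (Returned (conv u₀) (do_floor.spec others frames Blk mi) u ret) := by
  have hloop := loop_ok Lay hLay μ hμ u₀ hcode hload8 hload1 hload2 hdraw hload4 others frames Blk mi u ret he hpre f m i C mux fl G V hf hm hi hC hmux hfl' hG hV n2v N nn tlo hn2v hN hnn htlo
  v_entry he
  obtain ⟨hsh, hok, hlive, hob, hfl, hmp, hmi, hrsi, ⟨hi0, hi1⟩, ⟨sz, hfy, hfysz⟩, htgt, hdb⟩ := hpre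
  have hdraw' := hdraw others frames
  have hsp := hsh.rsp
  -- THE OBJECTS: `*f`, the mapping record, the `chan` element, the floor element, the `finalY` block
  rw [hf] at hob hfl hmp hmi hrsi hi1 hfysz htgt
  rw [hm] at hrsi
  have hrec : MappingAtOK Blk u.mem f m := by
    rw [hrsi]
    exact hmp.record mi hmi
  have hiC : (i : Int) < stb_vorbis.channels u.mem f := by omega
  obtain ⟨hmuxS, hmux16⟩ := hrec.mux_lt hiC
  have hflc := hrec.floor_of_mux_lt hiC
  rw [hmux] at hmuxS hmux16 hflc
  rw [hfl'] at hflc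
  have hFL1 := hfl.FL1
  have hfl64 : fl < 64 := by omega
  have hg : IsFloor u.mem f (G + 1596 * fl) := IsFloor.of_eq hflc (by rw [hG]; rfl)
  have hF1 := hfl.floor hg
  obtain ⟨hV2', hV250'⟩ := hF1.values_bounds
  have hV2 : 2 ≤ V := by omega
  have hV250 : V ≤ 250 := by omega
  have hszV : 2 * V ≤ sz := by
    have := hfysz _ hg
    omega
  -- where they are: in the data space, off this function's stack
  have hmc := hmp.MP1
  obtain ⟨hwm, hwm'⟩ := range_where hsh hlive he_room he_top hmp.MP1_block m 56 (by omega)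
    (by rw [hrsi]; simp only [stb_vorbis.mapping_at, voff]; omega)
    (by rw [hrsi]; simp only [stb_vorbis.mapping_at, voff]; omega)
  obtain ⟨hwc, hwc'⟩ := range_where hsh hlive he_room he_top hrec.MP2 (C + 3 * i) 3 (by omega)
    (by rw [hC]; simp only []; omega) (by rw [hC, nchan_def]; simp only [voff]; omega)
  obtain ⟨hwf, hwf'⟩ := range_where hsh hlive he_room he_top hob f 1808 (by omega)
    (by simp only [vblock]; omega) (by simp only [vblock, voff]; omega)
  have hgin := hfl.toFloorShape.elem_in hg (off := 0) (n := 1596) (by simp only [voff]; omega)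
  obtain ⟨hwg, hwg'⟩ := range_where hsh hlive he_room he_top hfl.FL2 (G + 1596 * fl) 1596 (by omega)
    (by simp only [Block.contains] at hgin; omega) (by simp only [Block.contains] at hgin; omega)
  obtain ⟨hwy, hwy'⟩ := range_where hsh hlive he_room he_top hfy (u.reg .r9).toNat (2 * V) (by omega)
    (by simp only []; omega) (by simp only []; omega)
  -- THE LOADS OF THE PROLOGUE, in the walker's form (facts `u.mem.readLE a n = x` are rewrite rules of every step)
  have hsx : Word.ofBV (BitVec.signExtend 64 (Word.part .w32 (u.reg .rdx))) = UInt64.ofNat i := sext_of_nonneg _ i hi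
  have hi22 : i < 0x400000 := by omega
  have hz1 := zext8 mux (by omega)
  have hz2 := zext8 fl (by omega)
  have hz3 := zext_part8 fl (by omega)
  have r1 : u.mem.readLE (u.reg .rsi + 8) 8 = C := by
    rw [← hC, readLE_at u.mem _ (m + 8) 8 (by u_omega)]
    simp only [vacc, voff]
    rfl
  have r2 : u.mem.readLE (UInt64.ofNat i + UInt64.ofNat i * 2 + UInt64.ofNat C + 2) 1 = mux := by
    rw [← hmux, readLE_at u.mem _ (C + 3 * i + 2) 1 (by u_omega)]
    simp only [Mapping.chan_at, MappingChannel.mux, voff, hC]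
    rfl
  have r3 : u.mem.readLE (u.reg .rsi + UInt64.ofNat mux + 17) 1 = fl := by
    rw [← hfl', readLE_at u.mem _ (m + 17 + mux) 1 (by u_omega)]
    simp only [vacc, voff]
    rfl
  have r4 : u.mem.readLE (u.reg .rdi + (UInt64.ofNat fl + 88) * 2 + 4) 2 = 1 := by
    rw [← hfl.FL3 fl hflc, readLE_at u.mem _ (f + 180 + 2 * fl) 2 (by u_omega)]
    simp only [vacc, voff]
    rfl
  have r5 : u.mem.readLE (u.reg .rdi + 312) 8 = G := by
    rw [← hG, readLE_at u.mem _ (f + 312) 8 (by u_omega)]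
    simp only [vacc, voff]
    rfl
  have rvu : u.mem.readLE (UInt64.ofNat fl * 1596 + UInt64.ofNat G + 1592) 4 = V := by
    rw [readLE_at u.mem _ (G + 1596 * fl + 1592) 4 (by u_omega)]
    have h32 := u.mem.i32_cases (G + 1596 * fl + 1592)
    have hV' : u.mem.i32 (G + 1596 * fl + 1592) = (V : Int) := by
      rw [← hV]
      simp only [vacc, voff]
    show u.mem.u32 (G + 1596 * fl + 1592) = V
    omega
  have hso : ∀ q : Nat, q < V →
      u.mem.readLE (UInt64.ofNat fl * 1596 + UInt64.ofNat G + UInt64.ofNat q + 838) 1 < V := by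
    intro q hq
    have h9 := hF1.sorted_lt (q := q) (by omega)
    rw [hV] at h9
    rw [readLE_at u.mem _ (G + 1596 * fl + 838 + q) 1 (by u_omega)]
    simp only [vacc, voff] at h9
    have e : u.mem.readLE (addr (G + 1596 * fl + 838 + q)) 1 = u.mem.u8 (G + 1596 * fl + 838 + q) := rfl
    rw [e]
    omega
  -- `n2 = n >> 1`, and THE WINDOW OF THE TARGET THAT IS WRITTEN (empty, placed at 0, when `n2 ≤ 0`)
  have hn2N : n2v.toInt = N := by
    rw [← hn2v, toInt_sar1]
    exact hN
  have hNlt : N < 2 ^ 31 := by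
    rw [← hn2N]
    exact BitVec.toInt_lt
  rw [hN] at htgt
  rw [hnn] at htgt
  have htw : tlo + 4 * nn ≤ 0xC00000 ∧
      (tlo + 4 * nn ≤ G + 1596 * fl ∨ G + 1596 * fl + 1596 ≤ tlo) ∧
      (tlo + 4 * nn ≤ (u.reg .rsp).toNat - 192 ∨ (u.reg .rsp).toNat + 8 ≤ tlo) ∧
      (nn = 0 ∨ (tlo = (u.reg .r8).toNat ∧ 0x119d40 ≤ tlo)) := by
    by_cases h0 : nn = 0
    · rw [if_pos h0] at htlo
      omega
    · rw [if_neg h0] at htlo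
      obtain ⟨hl, hd⟩ := htgt.resolve_left (by omega)
      have hw := hl.where_ hsh.inv hsh.offText (by omega)
      simp only [Block.disjoint, floorBlock, hG, voff] at hd
      simp only [Block.contains, floorBlock, hG, voff] at hgin
      omega
  obtain ⟨ht1, ht2, ht3, ht4⟩ := htw
  -- `ly = finalY[0] * g->floor1_multiplier` as a bounded 32-bit value
  obtain ⟨y0, hy0⟩ : ∃ y0 : Nat, u.mem.readLE (u.reg .r9) 2 = y0 := ⟨_, rfl⟩
  obtain ⟨mult0, hmult0⟩ : ∃ mult0 : Nat,
      u.mem.readLE (UInt64.ofNat fl * 1596 + UInt64.ofNat G + 1588) 1 = mult0 := ⟨_, rfl⟩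
  obtain ⟨lyv0, hlyv0⟩ : ∃ lyv0 : BitVec 32,
      BitVec.signExtend 32 (BitVec.ofNat 16 y0) * BitVec.zeroExtend 32 (BitVec.ofNat 8 mult0) = lyv0 := ⟨_, rfl⟩
  obtain ⟨hl0, hl1⟩ := mul_i16_u8 (BitVec.ofNat 16 y0) (BitVec.ofNat 8 mult0)
  rw [hlyv0] at hl0 hl1
  intro s w_rip w_rsp w_rbx w_rbp w_r15 w_rdi w_kept hsame hun hs0 hs1 hs2 hs3 hs4 hs5 hs6 hst hsn w_eq hdf hmx hsse
  -- the loads of this part, through the frame of the prologue (the objects are off the stack)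
  have r5s : s.mem.readLE (u.reg .rdi + 312) 8 = G := by
    u_frame r5
  have hy0s : s.mem.readLE (u.reg .r9) 2 = y0 := by
    u_frame hy0
  have hmult0s : s.mem.readLE (UInt64.ofNat fl * 1596 + UInt64.ofNat G + 1588) 1 = mult0 := by
    u_frame hmult0
  clear hwm' hwc' ht2 ht3 ht4 htgt r1 r2 r3 r4 hso rvu
  u_walk hcode [hμ.vendor, hz2, hz3, hlyv0] until [Vorbis.L.do_floor.loop1] span [Vorbis.L.textLo, Vorbis.L.textHi] side (v_side)
  · -- 0x108a3d: load8 f->floor_config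
    have hun' : ShadowUntouched u.mem s_108a3d.mem := by v_untouched
    exact check_site hsh.inv hun' (site_floor_config hlive hob (a := f + 312) (by simp only [voff])) (by u_omega)
  · -- 0x108a56: load2 finalY[0] (values ≥ 2)
    have hun' : ShadowUntouched u.mem s_108a56.mem := by v_untouched
    exact check_site hsh.inv hun' (Site.of_blk hlive hfy (a := (u.reg .r9).toNat) (n := 2) (by simp only []; omega)
      (by simp only []; omega) (by omega)) rfl
  · -- 0x108a66: load1 g->floor1_multiplier
    have hun' : ShadowUntouched u.mem s_108a66.mem := by v_untouched
    exact check_site hsh.inv hun' (hfl.toFloorShape.site_elem hlive hg 1588 1 (by simp only [voff]; omega) (by omega) rfl)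
      (by u_omega)
  · -- the head of the floor loop, first time: q = 1, lx = 0
    refine hloop s_108a84 1 0 lyv0 w_rip w_rsp w_rbx w_r15 ?_ (by omega) (by omega) ?_ (by omega)
      (w_kept.mono_all (by rfl)) ?_ ?_ ?_ ?_ ?_ ?_ ?_ ?_ ?_ ?_ ?_ ?_ hl0 hl1 w_eq ?_ ?_ ?_
    · rw [w_r12]
      rfl
    · rw [w_r13]
      rfl
    · u_same
    · v_untouched
    · u_frame hs0
    · u_frame hs1
    · u_frame hs2
    · u_frame hs3
    · u_frame hs4
    · u_frame hs5
    · u_frame hs6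
    · u_frame hst
    · u_frame hsn
    · rw [w_mem, Mem.readLE_writeLE_same _ _ _ _ (by decide)]
      exact Nat.mod_eq_of_lt lyv0.isLt
    · rw [w_flags]
      simp only [X86.User.df_setStatus]
      assumption
    · rw [w_mxcsr]
      exact hmx
    · refine ⟨?_⟩
      rw [w_mxcsr]
      exact hmx

/-- **THE PROLOGUE, SECOND PART** 0x108a0e … 0x108a36 (lines 3103–3104: `floor = map->submap_floor[s]`, the test of
`f->floor_types[floor]`, which is 1 by FL3, so that the `error` arm is dead), from the check of `map->submap_floor[s]` to the
check of `f->floor_config`, then `pro3_ok`. Same binders as `loop_ok`; then the frame of the prologue at the state `s`. -/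
theorem pro2_ok
    (Lay : Layout) (hLay : Lay.hi = 0x1000000) (μ : Microarch) (hμ : UserX.MicroOK μ) (u₀ : State)
    (hcode : HasCodeNat Lay u₀ Vorbis.L.do_floor.entry Vorbis.Code.code_do_floor.nat Vorbis.L.do_floor.size)
    (hload8 : Asan.SmallCheck Lay μ Vorbis.WayInv (Vorbis.CodeOK u₀) [.rax, .rcx, .rdx] 8 Vorbis.L.__asan_load8_noabort.entry)
    (hload1 : Asan.SmallCheck Lay μ Vorbis.WayInv (Vorbis.CodeOK u₀) [.rax, .rdx] 1 Vorbis.L.__asan_load1_noabort.entry)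
    (hload2 : Asan.SmallCheck Lay μ Vorbis.WayInv (Vorbis.CodeOK u₀) [.rax, .rcx, .rdx] 2 Vorbis.L.__asan_load2_noabort.entry)
    (hdraw : ∀ (others : List Obj) (frames : List (Nat × FrameLayout)),
      Calls Lay μ Vorbis.WayInv (Vorbis.conv u₀) Vorbis.L.draw_line.entry (Vorbis.Spec.draw_line.spec others frames))
    (hload4 : Asan.SmallCheck Lay μ Vorbis.WayInv (Vorbis.CodeOK u₀) [.rax, .rcx, .rdx] 4 Vorbis.L.__asan_load4_noabort.entry)
    (others : List Obj) (frames : List (Nat × FrameLayout)) (Blk : Block → Prop) (mi : Nat) (u : State) (ret : Word)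
    (he : AtEntry (Vorbis.conv u₀) Vorbis.L.do_floor.entry (Vorbis.Spec.do_floor.spec others frames Blk mi).frame ret u)
    (hpre : (Vorbis.Spec.do_floor.spec others frames Blk mi).pre u)
    (f m i C mux fl G V : Nat) (hf : (u.reg .rdi).toNat = f) (hm : (u.reg .rsi).toNat = m)
    (hi : s32 (u.reg .rdx) = (i : Int)) (hC : Mapping.chan u.mem m = C)
    (hmux : MappingChannel.mux u.mem (Mapping.chan_at u.mem m i) = mux)
    (hfl' : Mapping.submap_floor u.mem m mux = fl) (hG : stb_vorbis.floor_config u.mem f = G)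
    (hV : Floor1.values u.mem (G + 1596 * fl) = (V : Int))
    (n2v : BitVec 32) (N : Int) (nn tlo : Nat) (hn2v : (Word.part .w32 (u.reg .rcx)).sshiftRight 1 = n2v)
    (hN : s32 (u.reg .rcx) / 2 = N) (hnn : N.toNat = nn)
    (htlo : tlo = if nn = 0 then 0 else (u.reg .r8).toNat) :
    ∀ (s : State), s.rip = Vorbis.L.do_floor.chk3 →
      s.reg .rsp = u.reg .rsp - 72 →
      s.reg .rbx = u.reg .rsi →
      s.reg .r12 = UInt64.ofNat mux →
      s.reg .rbp = u.reg .rdi →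
      s.reg .r15 = u.reg .r9 →
      s.reg .rdi = u.reg .rsi + UInt64.ofNat mux + 17 →
      RegsKept [.r13, .rdi, .rcx, .r15, .r12, .rbx, .rbp, .rsp, .rax, .rdx, .r14, .rsi, .r8, .r9, .r10, .r11, .r16, .r17, .r18, .r19, .r20, .r21, .r22, .r23, .r24, .r25, .r26, .r27, .r28, .r29, .r30, .r31] u s →
      Mem.SameExcept [⟨(u.reg .rsp).toNat - 192, (u.reg .rsp).toNat⟩] u.mem s.mem →
      ShadowUntouched u.mem s.mem →
      UInt64.ofNat (s.mem.readLE (u.reg .rsp) 8) = ret →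
      UInt64.ofNat (s.mem.readLE (u.reg .rsp - 8) 8) = u.reg .r15 →
      UInt64.ofNat (s.mem.readLE (u.reg .rsp - 16) 8) = u.reg .r14 →
      UInt64.ofNat (s.mem.readLE (u.reg .rsp - 24) 8) = u.reg .r13 →
      UInt64.ofNat (s.mem.readLE (u.reg .rsp - 32) 8) = u.reg .r12 →
      UInt64.ofNat (s.mem.readLE (u.reg .rsp - 40) 8) = u.reg .rbp →
      UInt64.ofNat (s.mem.readLE (u.reg .rsp - 48) 8) = u.reg .rbx →
      UInt64.ofNat (s.mem.readLE (u.reg .rsp - 64) 8) = u.reg .r8 →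
      s.mem.readLE (u.reg .rsp - 68) 4 = n2v.toNat →
      Mem.EqOn Vorbis.L.textLo Vorbis.L.textHi u₀.mem s.mem →
      s.flags .df = false → s.mxcsr &&& 8064 = 8064 → SseOK s →
      ReachVia Lay μ WayInv s (Returned (conv u₀) (do_floor.spec others frames Blk mi) u ret) := by
  have hpro3 := pro3_ok Lay hLay μ hμ u₀ hcode hload8 hload1 hload2 hdraw hload4 others frames Blk mi u ret he hpre f m i C mux fl G V hf hm hi hC hmux hfl' hG hV n2v N nn tlo hn2v hN hnn htlo
  v_entry he
  obtain ⟨hsh, hok, hlive, hob, hfl, hmp, hmi, hrsi, ⟨hi0, hi1⟩, ⟨sz, hfy, hfysz⟩, htgt, hdb⟩ := hpre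
  have hdraw' := hdraw others frames
  have hsp := hsh.rsp
  -- THE OBJECTS: `*f`, the mapping record, the `chan` element, the floor element, the `finalY` block
  rw [hf] at hob hfl hmp hmi hrsi hi1 hfysz htgt
  rw [hm] at hrsi
  have hrec : MappingAtOK Blk u.mem f m := by
    rw [hrsi]
    exact hmp.record mi hmi
  have hiC : (i : Int) < stb_vorbis.channels u.mem f := by omega
  obtain ⟨hmuxS, hmux16⟩ := hrec.mux_lt hiC
  have hflc := hrec.floor_of_mux_lt hiC
  rw [hmux] at hmuxS hmux16 hflc
  rw [hfl'] at hflc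
  have hFL1 := hfl.FL1
  have hfl64 : fl < 64 := by omega
  have hg : IsFloor u.mem f (G + 1596 * fl) := IsFloor.of_eq hflc (by rw [hG]; rfl)
  have hF1 := hfl.floor hg
  obtain ⟨hV2', hV250'⟩ := hF1.values_bounds
  have hV2 : 2 ≤ V := by omega
  have hV250 : V ≤ 250 := by omega
  have hszV : 2 * V ≤ sz := by
    have := hfysz _ hg
    omega
  -- where they are: in the data space, off this function's stack
  have hmc := hmp.MP1
  obtain ⟨hwm, hwm'⟩ := range_where hsh hlive he_room he_top hmp.MP1_block m 56 (by omega)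
    (by rw [hrsi]; simp only [stb_vorbis.mapping_at, voff]; omega)
    (by rw [hrsi]; simp only [stb_vorbis.mapping_at, voff]; omega)
  obtain ⟨hwc, hwc'⟩ := range_where hsh hlive he_room he_top hrec.MP2 (C + 3 * i) 3 (by omega)
    (by rw [hC]; simp only []; omega) (by rw [hC, nchan_def]; simp only [voff]; omega)
  obtain ⟨hwf, hwf'⟩ := range_where hsh hlive he_room he_top hob f 1808 (by omega)
    (by simp only [vblock]; omega) (by simp only [vblock, voff]; omega)
  have hgin := hfl.toFloorShape.elem_in hg (off := 0) (n := 1596) (by simp only [voff]; omega)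
  obtain ⟨hwg, hwg'⟩ := range_where hsh hlive he_room he_top hfl.FL2 (G + 1596 * fl) 1596 (by omega)
    (by simp only [Block.contains] at hgin; omega) (by simp only [Block.contains] at hgin; omega)
  obtain ⟨hwy, hwy'⟩ := range_where hsh hlive he_room he_top hfy (u.reg .r9).toNat (2 * V) (by omega)
    (by simp only []; omega) (by simp only []; omega)
  -- THE LOADS OF THE PROLOGUE, in the walker's form (facts `u.mem.readLE a n = x` are rewrite rules of every step)
  have hsx : Word.ofBV (BitVec.signExtend 64 (Word.part .w32 (u.reg .rdx))) = UInt64.ofNat i := sext_of_nonneg _ i hi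
  have hi22 : i < 0x400000 := by omega
  have hz1 := zext8 mux (by omega)
  have hz2 := zext8 fl (by omega)
  have hz3 := zext_part8 fl (by omega)
  have r1 : u.mem.readLE (u.reg .rsi + 8) 8 = C := by
    rw [← hC, readLE_at u.mem _ (m + 8) 8 (by u_omega)]
    simp only [vacc, voff]
    rfl
  have r2 : u.mem.readLE (UInt64.ofNat i + UInt64.ofNat i * 2 + UInt64.ofNat C + 2) 1 = mux := by
    rw [← hmux, readLE_at u.mem _ (C + 3 * i + 2) 1 (by u_omega)]
    simp only [Mapping.chan_at, MappingChannel.mux, voff, hC]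
    rfl
  have r3 : u.mem.readLE (u.reg .rsi + UInt64.ofNat mux + 17) 1 = fl := by
    rw [← hfl', readLE_at u.mem _ (m + 17 + mux) 1 (by u_omega)]
    simp only [vacc, voff]
    rfl
  have r4 : u.mem.readLE (u.reg .rdi + (UInt64.ofNat fl + 88) * 2 + 4) 2 = 1 := by
    rw [← hfl.FL3 fl hflc, readLE_at u.mem _ (f + 180 + 2 * fl) 2 (by u_omega)]
    simp only [vacc, voff]
    rfl
  have r5 : u.mem.readLE (u.reg .rdi + 312) 8 = G := by
    rw [← hG, readLE_at u.mem _ (f + 312) 8 (by u_omega)]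
    simp only [vacc, voff]
    rfl
  have rvu : u.mem.readLE (UInt64.ofNat fl * 1596 + UInt64.ofNat G + 1592) 4 = V := by
    rw [readLE_at u.mem _ (G + 1596 * fl + 1592) 4 (by u_omega)]
    have h32 := u.mem.i32_cases (G + 1596 * fl + 1592)
    have hV' : u.mem.i32 (G + 1596 * fl + 1592) = (V : Int) := by
      rw [← hV]
      simp only [vacc, voff]
    show u.mem.u32 (G + 1596 * fl + 1592) = V
    omega
  have hso : ∀ q : Nat, q < V →
      u.mem.readLE (UInt64.ofNat fl * 1596 + UInt64.ofNat G + UInt64.ofNat q + 838) 1 < V := by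
    intro q hq
    have h9 := hF1.sorted_lt (q := q) (by omega)
    rw [hV] at h9
    rw [readLE_at u.mem _ (G + 1596 * fl + 838 + q) 1 (by u_omega)]
    simp only [vacc, voff] at h9
    have e : u.mem.readLE (addr (G + 1596 * fl + 838 + q)) 1 = u.mem.u8 (G + 1596 * fl + 838 + q) := rfl
    rw [e]
    omega
  -- `n2 = n >> 1`, and THE WINDOW OF THE TARGET THAT IS WRITTEN (empty, placed at 0, when `n2 ≤ 0`)
  have hn2N : n2v.toInt = N := by
    rw [← hn2v, toInt_sar1]
    exact hN
  have hNlt : N < 2 ^ 31 := by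
    rw [← hn2N]
    exact BitVec.toInt_lt
  rw [hN] at htgt
  rw [hnn] at htgt
  have htw : tlo + 4 * nn ≤ 0xC00000 ∧
      (tlo + 4 * nn ≤ G + 1596 * fl ∨ G + 1596 * fl + 1596 ≤ tlo) ∧
      (tlo + 4 * nn ≤ (u.reg .rsp).toNat - 192 ∨ (u.reg .rsp).toNat + 8 ≤ tlo) ∧
      (nn = 0 ∨ (tlo = (u.reg .r8).toNat ∧ 0x119d40 ≤ tlo)) := by
    by_cases h0 : nn = 0
    · rw [if_pos h0] at htlo
      omega
    · rw [if_neg h0] at htlo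
      obtain ⟨hl, hd⟩ := htgt.resolve_left (by omega)
      have hw := hl.where_ hsh.inv hsh.offText (by omega)
      simp only [Block.disjoint, floorBlock, hG, voff] at hd
      simp only [Block.contains, floorBlock, hG, voff] at hgin
      omega
  obtain ⟨ht1, ht2, ht3, ht4⟩ := htw
  intro s w_rip w_rsp w_rbx w_r12 w_rbp w_r15 w_rdi w_kept hsame hun hs0 hs1 hs2 hs3 hs4 hs5 hs6 hst hsn w_eq hdf hmx hsse
  -- the loads of this part, through the frame of the prologue (the objects are off the stack)
  have r3s : s.mem.readLE (u.reg .rsi + UInt64.ofNat mux + 17) 1 = fl := by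
    u_frame r3
  have r4s : s.mem.readLE (u.reg .rdi + (UInt64.ofNat fl + 88) * 2 + 4) 2 = 1 := by
    u_frame r4
  clear hwc' hwg' hwy' ht2 ht3 ht4 htgt r1 r2 r3 r4 r5 hso rvu
  u_walk hcode [hμ.vendor, hz2, hz3] until [Vorbis.L.do_floor.chk5] span [Vorbis.L.textLo, Vorbis.L.textHi] side (v_side)
  · -- 0x108a0e: load1 map->submap_floor[mux], mux < 16 (MP5, MP3)
    have hun' : ShadowUntouched u.mem s_108a0e.mem := by v_untouched
    exact check_site hsh.inv hun' (hmp.site_submap_floor hlive hmi (s := mux) (by simp only [voff]; omega) (a := m + 17 + mux)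
      (by rw [← hrsi]; simp only [voff])) (by u_omega)
  · -- 0x108a28: load2 f->floor_types[floor], floor < floor_count ≤ 64 (MP6, FL1)
    have hun' : ShadowUntouched u.mem s_108a28.mem := by v_untouched
    exact check_site hsh.inv hun' (site_floor_types hlive hob (i := fl) (by simp only [voff]; omega) (a := f + 180 + 2 * fl)
      (by simp only [voff])) (by u_omega)
  · -- 0x108a36 → 0x108a3d: the check of `f->floor_config`
    refine hpro3 s_108a36 w_rip w_rsp ?_ w_rbp w_r15 w_rdi (w_kept.mono_all (by rfl)) ?_ ?_ ?_ ?_ ?_ ?_ ?_ ?_ ?_ ?_ ?_ w_eq ?_ ?_ ?_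
    · rw [w_rbx]
      exact hz2
    · u_same
    · v_untouched
    · u_frame hs0
    · u_frame hs1
    · u_frame hs2
    · u_frame hs3
    · u_frame hs4
    · u_frame hs5
    · u_frame hs6
    · u_frame hst
    · u_frame hsn
    · rw [w_flags]
      simp only [X86.User.df_setStatus]
      assumption
    · rw [w_mxcsr]
      exact hmx
    · refine ⟨?_⟩
      rw [w_mxcsr]
      exact hmx

end Vorbis.Spec.do_floor

/-- `do_floor` satisfies its contract. The proof: (1) the objects the function reads (`*f`, the mapping record, the `chan` element,
the floor element `g`, the `finalY` block) are located once, as arithmetic facts, and the loads of the prologue are given to the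
walk as facts; (2) the first part of the prologue (the pushes, the spills, `s = map->chan[i].mux`) is walked to the check of
`map->submap_floor[s]` 0x108a0e; (3) from there `pro2_ok`, `pro3_ok` (the rest of the prologue, above) and `loop_ok` (Lemmas.lean:
the floor loop with the call of draw_line, its exits, and through `tail_ok` the tail loop 0x108bab to the `ret`). The proof is cut
into these theorems because ONE theorem needed more than 32 GB. -/
theorem Vorbis.Spec.Worked.do_floor_ok : Vorbis.Spec.do_floor.Statement := by
  intro Lay hLay μ hμ u₀ hcode hload8 hload1 hload2 herror hdraw hload4 others frames Blk mi u ret he hpre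
  v_entry he
  -- (a copy of the precondition for `loop_ok`, boxed so that the side tactic does not look into it)
  have hbox : ∃ _ : Unit, (Vorbis.Spec.do_floor.spec others frames Blk mi).pre u := ⟨(), hpre⟩
  obtain ⟨hsh, hok, hlive, hob, hfl, hmp, hmi, hrsi, ⟨hi0, hi1⟩, ⟨sz, hfy, hfysz⟩, htgt, hdb⟩ := hpre
  have hdraw' := hdraw others frames
  have hsp := hsh.rsp
  -- THE OBJECTS: `*f`, the mapping record, the `chan` element, the floor element, the `finalY` block
  obtain ⟨f, hf⟩ : ∃ f : Nat, (u.reg .rdi).toNat = f := ⟨_, rfl⟩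
  obtain ⟨m, hm⟩ : ∃ m : Nat, (u.reg .rsi).toNat = m := ⟨_, rfl⟩
  rw [hf] at hob hfl hmp hmi hrsi hi1 hfysz htgt
  rw [hm] at hrsi
  have hrec : MappingAtOK Blk u.mem f m := by
    rw [hrsi]
    exact hmp.record mi hmi
  obtain ⟨i, hi⟩ : ∃ i : Nat, s32 (u.reg .rdx) = (i : Int) := ⟨(s32 (u.reg .rdx)).toNat, by omega⟩
  have hiC : (i : Int) < stb_vorbis.channels u.mem f := by omega
  obtain ⟨C, hC⟩ : ∃ C : Nat, Mapping.chan u.mem m = C := ⟨_, rfl⟩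
  obtain ⟨mux, hmux⟩ : ∃ mux : Nat, MappingChannel.mux u.mem (Mapping.chan_at u.mem m i) = mux := ⟨_, rfl⟩
  obtain ⟨hmuxS, hmux16⟩ := hrec.mux_lt hiC
  have hflc := hrec.floor_of_mux_lt hiC
  rw [hmux] at hmuxS hmux16 hflc
  obtain ⟨fl, hfl'⟩ : ∃ fl : Nat, Mapping.submap_floor u.mem m mux = fl := ⟨_, rfl⟩
  rw [hfl'] at hflc
  have hFL1 := hfl.FL1
  have hfl64 : fl < 64 := by omega
  obtain ⟨G, hG⟩ : ∃ G : Nat, stb_vorbis.floor_config u.mem f = G := ⟨_, rfl⟩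
  have hg : IsFloor u.mem f (G + 1596 * fl) := IsFloor.of_eq hflc (by rw [hG]; rfl)
  have hF1 := hfl.floor hg
  obtain ⟨hV2', hV250'⟩ := hF1.values_bounds
  obtain ⟨V, hV⟩ : ∃ V : Nat, Floor1.values u.mem (G + 1596 * fl) = (V : Int) := ⟨(Floor1.values u.mem (G + 1596 * fl)).toNat, by omega⟩
  have hV2 : 2 ≤ V := by omega
  have hV250 : V ≤ 250 := by omega
  have hszV : 2 * V ≤ sz := by
    have := hfysz _ hg
    omega
  -- where they are: in the data space, off this function's stack
  have hmc := hmp.MP1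
  obtain ⟨hwm, hwm'⟩ := range_where hsh hlive he_room he_top hmp.MP1_block m 56 (by omega)
    (by rw [hrsi]; simp only [stb_vorbis.mapping_at, voff]; omega)
    (by rw [hrsi]; simp only [stb_vorbis.mapping_at, voff]; omega)
  obtain ⟨hwc, hwc'⟩ := range_where hsh hlive he_room he_top hrec.MP2 (C + 3 * i) 3 (by omega)
    (by rw [hC]; simp only []; omega) (by rw [hC, nchan_def]; simp only [voff]; omega)
  obtain ⟨hwf, hwf'⟩ := range_where hsh hlive he_room he_top hob f 1808 (by omega)
    (by simp only [vblock]; omega) (by simp only [vblock, voff]; omega)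
  have hgin := hfl.toFloorShape.elem_in hg (off := 0) (n := 1596) (by simp only [voff]; omega)
  obtain ⟨hwg, hwg'⟩ := range_where hsh hlive he_room he_top hfl.FL2 (G + 1596 * fl) 1596 (by omega)
    (by simp only [Block.contains] at hgin; omega) (by simp only [Block.contains] at hgin; omega)
  obtain ⟨hwy, hwy'⟩ := range_where hsh hlive he_room he_top hfy (u.reg .r9).toNat (2 * V) (by omega)
    (by simp only []; omega) (by simp only []; omega)
  -- THE LOADS OF THE PROLOGUE, in the walker's form (facts `u.mem.readLE a n = x` are rewrite rules of every step)
  have hsx : Word.ofBV (BitVec.signExtend 64 (Word.part .w32 (u.reg .rdx))) = UInt64.ofNat i := sext_of_nonneg _ i hi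
  have hi22 : i < 0x400000 := by omega
  have hz1 := zext8 mux (by omega)
  have hz2 := zext8 fl (by omega)
  have hz3 := zext_part8 fl (by omega)
  have r1 : u.mem.readLE (u.reg .rsi + 8) 8 = C := by
    rw [← hC, readLE_at u.mem _ (m + 8) 8 (by u_omega)]
    simp only [vacc, voff]
    rfl
  have r2 : u.mem.readLE (UInt64.ofNat i + UInt64.ofNat i * 2 + UInt64.ofNat C + 2) 1 = mux := by
    rw [← hmux, readLE_at u.mem _ (C + 3 * i + 2) 1 (by u_omega)]
    simp only [Mapping.chan_at, MappingChannel.mux, voff, hC]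
    rfl
  have r3 : u.mem.readLE (u.reg .rsi + UInt64.ofNat mux + 17) 1 = fl := by
    rw [← hfl', readLE_at u.mem _ (m + 17 + mux) 1 (by u_omega)]
    simp only [vacc, voff]
    rfl
  have r4 : u.mem.readLE (u.reg .rdi + (UInt64.ofNat fl + 88) * 2 + 4) 2 = 1 := by
    rw [← hfl.FL3 fl hflc, readLE_at u.mem _ (f + 180 + 2 * fl) 2 (by u_omega)]
    simp only [vacc, voff]
    rfl
  have r5 : u.mem.readLE (u.reg .rdi + 312) 8 = G := by
    rw [← hG, readLE_at u.mem _ (f + 312) 8 (by u_omega)]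
    simp only [vacc, voff]
    rfl
  have rvu : u.mem.readLE (UInt64.ofNat fl * 1596 + UInt64.ofNat G + 1592) 4 = V := by
    rw [readLE_at u.mem _ (G + 1596 * fl + 1592) 4 (by u_omega)]
    have h32 := u.mem.i32_cases (G + 1596 * fl + 1592)
    have hV' : u.mem.i32 (G + 1596 * fl + 1592) = (V : Int) := by
      rw [← hV]
      simp only [vacc, voff]
    show u.mem.u32 (G + 1596 * fl + 1592) = V
    omega
  have hso : ∀ q : Nat, q < V →
      u.mem.readLE (UInt64.ofNat fl * 1596 + UInt64.ofNat G + UInt64.ofNat q + 838) 1 < V := by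
    intro q hq
    have h9 := hF1.sorted_lt (q := q) (by omega)
    rw [hV] at h9
    rw [readLE_at u.mem _ (G + 1596 * fl + 838 + q) 1 (by u_omega)]
    simp only [vacc, voff] at h9
    have e : u.mem.readLE (addr (G + 1596 * fl + 838 + q)) 1 = u.mem.u8 (G + 1596 * fl + 838 + q) := rfl
    rw [e]
    omega
  -- `n2 = n >> 1`, and THE WINDOW OF THE TARGET THAT IS WRITTEN (empty, placed at 0, when `n2 ≤ 0`)
  obtain ⟨n2v, hn2v⟩ : ∃ n2v : BitVec 32, (Word.part .w32 (u.reg .rcx)).sshiftRight 1 = n2v := ⟨_, rfl⟩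
  obtain ⟨N, hN⟩ : ∃ N : Int, s32 (u.reg .rcx) / 2 = N := ⟨_, rfl⟩
  have hn2N : n2v.toInt = N := by
    rw [← hn2v, toInt_sar1]
    exact hN
  have hNlt : N < 2 ^ 31 := by
    rw [← hn2N]
    exact BitVec.toInt_lt
  rw [hN] at htgt
  obtain ⟨nn, hnn⟩ : ∃ nn : Nat, N.toNat = nn := ⟨_, rfl⟩
  rw [hnn] at htgt
  obtain ⟨tlo, htlo⟩ : ∃ tlo : Nat, tlo = if nn = 0 then 0 else (u.reg .r8).toNat := ⟨_, rfl⟩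
  have htw : tlo + 4 * nn ≤ 0xC00000 ∧
      (tlo + 4 * nn ≤ G + 1596 * fl ∨ G + 1596 * fl + 1596 ≤ tlo) ∧
      (tlo + 4 * nn ≤ (u.reg .rsp).toNat - 192 ∨ (u.reg .rsp).toNat + 8 ≤ tlo) ∧
      (nn = 0 ∨ (tlo = (u.reg .r8).toNat ∧ 0x119d40 ≤ tlo)) := by
    by_cases h0 : nn = 0
    · rw [if_pos h0] at htlo
      omega
    · rw [if_neg h0] at htlo
      obtain ⟨hl, hd⟩ := htgt.resolve_left (by omega)
      have hw := hl.where_ hsh.inv hsh.offText (by omega)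
      simp only [Block.disjoint, floorBlock, hG, voff] at hd
      simp only [Block.contains, floorBlock, hG, voff] at hgin
      omega
  obtain ⟨ht1, ht2, ht3, ht4⟩ := htw
  clear ht2 ht3 ht4 htgt
  -- THE PROLOGUE, FIRST PART (0x1089c0 … 0x108a09): the pushes, the spills of `target` and `n2`, `s = map->chan[i].mux`
  u_walk hcode [hμ.vendor, hsx, hz1, hn2v] until [Vorbis.L.do_floor.chk3] span [Vorbis.L.textLo, Vorbis.L.textHi] side (v_side)
  · -- 0x1089e9: load8 map->chan
    have hun' : ShadowUntouched u.mem s_1089e9.mem := by v_untouched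
    exact check_site hsh.inv hun' (hmp.site_record hlive hmi 8 8 (by simp only [voff]; omega) (by omega) (a := m + 8)
      (by rw [← hrsi])) (by u_omega)
  · -- 0x1089fe: load1 map->chan[i].mux, i < channels (MP2)
    have hun' : ShadowUntouched u.mem s_1089fe.mem := by v_untouched
    exact check_site hsh.inv hun' (hrec.site_chan hlive hiC 2 1 (by simp only [voff]; omega) (by omega) (a := C + 3 * i + 2)
      (by simp only [Mapping.chan_at, voff, hC])) (by u_omega)
  · -- 0x108a09 → 0x108a0e: the check of `map->submap_floor[s]`; the rest is `pro2_ok`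
    obtain ⟨-, hpre'⟩ := hbox
    refine Vorbis.Spec.do_floor.pro2_ok Lay hLay μ hμ u₀ hcode hload8 hload1 hload2 hdraw hload4 others frames Blk mi u ret he hpre' f m i C mux fl G V hf hm hi hC hmux hfl' hG hV n2v N nn tlo hn2v hN hnn htlo s_108a09 w_rip w_rsp w_rbx ?_ w_rbp w_r15 w_rdi
      (w_kept.mono_all (by rfl)) ?_ ?_ ?_ ?_ ?_ ?_ ?_ ?_ ?_ ?_ ?_ w_eq ?_ ?_ ?_
    · rw [w_r12]
      exact hz1
    · u_same
    · v_untouched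
    · u_resolve
    · u_resolve
    · u_resolve
    · u_resolve
    · u_resolve
    · u_resolve
    · u_resolve
    · u_resolve
    · u_resolve
      exact Nat.mod_eq_of_lt n2v.isLt
    · -- the direction flag: the last check kept it, `movzx` / `lea` write no flag
      rw [w_flags]
      exact w_df_1089fe
    · rw [w_mxcsr]
      exact he_mx
    · refine ⟨?_⟩
      rw [w_mxcsr]
      exact he_mx
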